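-- pv_equiv track=rewrite | github.com/alben/AoC2019 | 04/solution.py | rule_two
-- ===== SOURCE A (Python) =====
-- def rule_two(number):
--     str_num = str(number)
--     dup = False
--     i = 0
--     while i < 5:
--         if str_num[i] > str_num[i+1]:
--             return False
--         if str_num[i] == str_num[i+1]:
--             o = i
--             i +=1
--             while i < 5 and str_num[i] == str_num[i+1]:
--                 i +=1
--             if o == i-1:
--                 dup = True
--         else:
--             i += 1
--     return dup
-- ===== SOURCE B (Python) =====
-- def rule_two(number):
--     s = str(number)
--     for i in range(5):
--         if s[i] > s[i + 1]:
--             return False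
--     runs = []
--     for c in s[:6]:
--         if runs and runs[-1][0] == c:
--             runs[-1][1] += 1
--         else:
--             runs.append([c, 1])
--     return any(n == 2 for _, n in runs)
-- ===== Notes on version B (the rewrite author's own statement) =====
-- stated objective: simpler
-- what changed: A's single interleaved scan with a nested skipping while-loop and run-start bookkeeping is replaced by two plain passes: a monotonic check over the five adjacent pairs of str(number), then run-length grouping of str(number)[:6] with an 'exact length 2' test.
import Mathlib
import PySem

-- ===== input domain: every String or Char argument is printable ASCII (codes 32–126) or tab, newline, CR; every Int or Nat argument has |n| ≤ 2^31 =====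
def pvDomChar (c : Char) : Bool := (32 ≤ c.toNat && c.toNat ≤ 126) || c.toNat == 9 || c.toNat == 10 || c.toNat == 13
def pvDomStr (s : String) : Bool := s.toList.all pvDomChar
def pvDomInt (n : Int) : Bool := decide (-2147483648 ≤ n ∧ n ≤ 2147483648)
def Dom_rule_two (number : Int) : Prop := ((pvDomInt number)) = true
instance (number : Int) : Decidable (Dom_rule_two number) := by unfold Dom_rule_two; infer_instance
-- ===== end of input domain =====

-- B replaces A's single interleaved scan with a nested skipping while-loop by a separate
-- monotonic check followed by run-length grouping with an 'exact length 2' test (objective: simpler).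

-- ===== PORT A =====
-- Python indexes str_num[i] for i ≤ 5 and raises IndexError when the string is shorter;
-- Pre_rule_two excludes those inputs, so the .getD default ' ' is never reached under Pre_.

-- inner while: `while i < 5 and str_num[i] == str_num[i+1]: i += 1`
def ruleTwoInner (cs : List Char) (i : Nat) : Nat :=
  if h : i < 5 ∧ cs.getD i ' ' = cs.getD (i + 1) ' ' then ruleTwoInner cs (i + 1) else i
termination_by 5 - i
decreasing_by omega

-- cited by the outer loop's decreasing_by
theorem le_ruleTwoInner (cs : List Char) (i : Nat) : i ≤ ruleTwoInner cs i := by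
  unfold ruleTwoInner
  split
  · have := le_ruleTwoInner cs (i + 1); omega
  · exact le_refl i
termination_by 5 - i
decreasing_by omega

-- outer while: `while i < 5: …`
def ruleTwoLoop (cs : List Char) (i : Nat) (dup : Bool) : Bool :=
  if h : i < 5 then
    if cs.getD i ' ' > cs.getD (i + 1) ' ' then false
    else if cs.getD i ' ' = cs.getD (i + 1) ' ' then
      let o := i
      let i' := ruleTwoInner cs (i + 1)
      ruleTwoLoop cs i' (if o = i' - 1 then true else dup)
    else ruleTwoLoop cs (i + 1) dup
  else dup
termination_by 6 - i
decreasing_by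
  · have := le_ruleTwoInner cs (i + 1); omega
  · omega

def rule_two (number : Int) : Bool :=
  ruleTwoLoop (PySem.Int.toChars number) 0 false

-- ===== PORT B =====
-- `if runs and runs[-1][0] == c: runs[-1][1] += 1 else: runs.append([c, 1])`
def addRun (runs : List (Char × Int)) (c : Char) : List (Char × Int) :=
  match runs.getLast? with
  | some (c0, k) => if c0 = c then runs.dropLast ++ [(c0, k + 1)] else runs ++ [(c, 1)]
  | none => [(c, 1)]

-- first pass indexes the raw string like A does (IndexError outside Pre_, getD default
-- unreachable under Pre_); the run grouping then reads str(number)[:6]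
def ruleTwoAltCore (cs : List Char) : Bool :=
  if (List.range 5).any (fun i => cs.getD i ' ' > cs.getD (i + 1) ' ') then false
  else ((PySem.List.slice cs none (some 6)).foldl addRun []).any (fun p => p.2 == 2)

def rule_two_alt (number : Int) : Bool :=
  ruleTwoAltCore (PySem.Int.toChars number)

-- ===== PRECONDITION & SPEC =====
-- A returns iff str(number) has ≥ 6 characters, or a strict descent between adjacent
-- characters occurs early enough (at pair k, both indices in range) for the scan to return
-- False before it indexes past the end; otherwise A raises IndexError and Pre_ excludes
-- the input (B's first pass raises there too).
def Pre_rule_two (number : Int) : Prop :=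
  6 ≤ (PySem.Int.toChars number).length ∨
    ∃ k, k < 5 ∧ k + 2 ≤ (PySem.Int.toChars number).length ∧
      (PySem.Int.toChars number).getD (k + 1) ' ' < (PySem.Int.toChars number).getD k ' '
instance (number : Int) : Decidable (Pre_rule_two number) := by unfold Pre_rule_two; infer_instance
def pvWitness_rule_two : Int := 123456

def Spec_rule_two (number : Int) (out : Bool) : Prop := out = rule_two_alt number
instance (number : Int) (out : Bool) : Decidable (Spec_rule_two number out) := by unfold Spec_rule_two; infer_instance

-- ===== CLAIM (what is proved, stated in full; the proofs are below) =====
def Claim_equal_rule_two : Prop := ∀ (number : Int), Dom_rule_two number → Pre_rule_two number → Spec_rule_two number (rule_two number)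

-- ===== LEMMAS AND PROOFS =====

-- the list of (strict-descent?, equal?) flags of the five adjacent pairs of the first six chars
def pairFlags (cs : List Char) : List (Bool × Bool) :=
  (List.range 5).map (fun i =>
    (decide (cs.getD (i + 1) ' ' < cs.getD i ' '), decide (cs.getD i ' ' = cs.getD (i + 1) ' ')))

-- structural simulation of A's interleaved scan over the flag list
-- (mode 0 = normal; 1 = just entered an equal run; 2 = deeper inside a run)
def loopM : List (Bool × Bool) → Bool → Nat → Bool
  | [], dup, m => if m = 1 then true else dup
  | (gt, eq) :: t, dup, m =>
    if m = 0 then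
      if gt then false else if eq then loopM t dup 1 else loopM t dup 0
    else if eq then loopM t dup 2
    else
      let dup' := if m = 1 then true else dup
      if gt then false else loopM t dup' 0

-- exact-length-2 run detector over the adjacent-equality flags, current run length k
def run2P (k : Int) : List Bool → Bool
  | [] => k == 2
  | e :: t => if e then run2P (k + 1) t else (k == 2) || run2P 1 t

-- run detector over the chars themselves (current run char c, length k)
def run2From (c : Char) (k : Int) : List Char → Bool
  | [] => k == 2
  | d :: t => if c = d then run2From c (k + 1) t else (k == 2) || run2From d 1 t

-- adjacent-equality pattern of c :: t
def pairsEq (c : Char) : List Char → List Bool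
  | [] => []
  | d :: t => decide (c = d) :: pairsEq d t

theorem exists_six {α : Type} (cs : List α) (h : 6 ≤ cs.length) :
    ∃ a b c d e f r, cs = a :: b :: c :: d :: e :: f :: r := by
  match cs with
  | a :: b :: c :: d :: e :: f :: r => exact ⟨a, b, c, d, e, f, r, rfl⟩
  | [] | [_] | [_, _] | [_, _, _] | [_, _, _, _] | [_, _, _, _, _] => simp at h

theorem pairFlags_drop_cons (cs : List Char) (j : Nat) (hj : j < 5) :
    (pairFlags cs).drop j =
      (decide (cs.getD (j + 1) ' ' < cs.getD j ' '), decide (cs.getD j ' ' = cs.getD (j + 1) ' '))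
        :: (pairFlags cs).drop (j + 1) := by
  have hlen : j < (pairFlags cs).length := by simp [pairFlags]; omega
  rw [List.drop_eq_getElem_cons hlen]
  simp [pairFlags]

theorem pairFlags_drop_five (cs : List Char) (j : Nat) (hj : 5 ≤ j) :
    (pairFlags cs).drop j = [] := by
  apply List.drop_eq_nil_of_le
  simp [pairFlags]; omega

-- the inner skipping loop corresponds to modes 1/2 of loopM
theorem skip_eq (cs : List Char) (j : Nat) (dup : Bool) (m : Nat) (hm : m = 1 ∨ m = 2) :
    loopM ((pairFlags cs).drop j) dup m =
      loopM ((pairFlags cs).drop (ruleTwoInner cs j))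
        (if m = 1 ∧ ruleTwoInner cs j = j then true else dup) 0 := by
  by_cases hj : j < 5
  · rw [pairFlags_drop_cons cs j hj]
    unfold ruleTwoInner
    by_cases heq : cs.getD j ' ' = cs.getD (j + 1) ' '
    · have h5 : j < 5 ∧ cs.getD j ' ' = cs.getD (j + 1) ' ' := ⟨hj, heq⟩
      rw [dif_pos h5]
      have hgt := le_ruleTwoInner cs (j + 1)
      have hne : ¬ (m = 1 ∧ ruleTwoInner cs (j + 1) = j) := by omega
      rw [if_neg hne]
      have hrec := skip_eq cs (j + 1) dup 2 (Or.inr rfl)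
      simp only [loopM, heq, decide_true, if_true]
      rcases hm with h1 | h1 <;> subst h1 <;> simpa using hrec
    · have h5 : ¬ (j < 5 ∧ cs.getD j ' ' = cs.getD (j + 1) ' ') := fun h => heq h.2
      rw [dif_neg h5]
      rw [pairFlags_drop_cons cs j hj]
      simp only [List.getD] at heq
      rcases hm with h1 | h1 <;> subst h1 <;> simp [loopM, heq]
  · rw [pairFlags_drop_five cs j (by omega)]
    unfold ruleTwoInner
    rw [dif_neg (fun h => hj h.1)]
    rw [pairFlags_drop_five cs j (by omega)]
    rcases hm with h1 | h1 <;> subst h1 <;> simp [loopM]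
termination_by 5 - j
decreasing_by omega

-- A's outer loop corresponds to mode 0 of loopM
theorem loop_eq (cs : List Char) (i : Nat) (dup : Bool) :
    ruleTwoLoop cs i dup = loopM ((pairFlags cs).drop i) dup 0 := by
  by_cases hi : i < 5
  · rw [pairFlags_drop_cons cs i hi]
    unfold ruleTwoLoop
    rw [dif_pos hi]
    by_cases hgt : cs.getD (i + 1) ' ' < cs.getD i ' '
    · simp only [loopM, gt_iff_lt, hgt, decide_true, if_true]
    · by_cases heq : cs.getD i ' ' = cs.getD (i + 1) ' '
      · have hinner := le_ruleTwoInner cs (i + 1)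
        have hrec := loop_eq cs (ruleTwoInner cs (i + 1))
          (if i = ruleTwoInner cs (i + 1) - 1 then true else dup)
        have hskip := skip_eq cs (i + 1) dup 1 (Or.inl rfl)
        have hdup : (if i = ruleTwoInner cs (i + 1) - 1 then true else dup)
            = (if 1 = 1 ∧ ruleTwoInner cs (i + 1) = i + 1 then true else dup) := by
          by_cases hstop : ruleTwoInner cs (i + 1) = i + 1
          · rw [if_pos (by omega), if_pos (by omega)]
          · rw [if_neg (by omega), if_neg (by omega)]
        simp only [loopM, heq, decide_true, if_true]
        rw [hrec, hdup, hskip]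
        simp
      · have hrec := loop_eq cs (i + 1) dup
        simp only [loopM, gt_iff_lt, hgt, decide_false, heq, Bool.false_eq_true, if_false]
        rw [hrec]
        simp
  · unfold ruleTwoLoop
    rw [dif_neg hi, pairFlags_drop_five cs i (by omega)]
    simp [loopM]
termination_by 6 - i
decreasing_by
  · have := le_ruleTwoInner cs (i + 1); omega
  · omega

-- B's fold over the run list, with the accumulator's last run exposed
theorem foldB (t : List Char) (acc : List (Char × Int)) (c : Char) (k : Int) :
    ((t.foldl addRun (acc ++ [(c, k)])).any (fun p => p.2 == 2))
      = (acc.any (fun p => p.2 == 2) || run2From c k t) := by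
  induction t generalizing acc c k with
  | nil => simp [run2From]
  | cons d t ih =>
    by_cases hcd : c = d
    · subst hcd
      have h1 : addRun (acc ++ [(c, k)]) c = acc ++ [(c, k + 1)] := by simp [addRun]
      rw [List.foldl_cons, h1, ih]
      simp [run2From]
    · have h1 : addRun (acc ++ [(c, k)]) d = (acc ++ [(c, k)]) ++ [(d, 1)] := by
        simp [addRun, hcd]
      rw [List.foldl_cons, h1, ih]
      simp [run2From, hcd, Bool.or_assoc]

theorem run2From_eq_run2P (t : List Char) (c : Char) (k : Int) :
    run2From c k t = run2P k (pairsEq c t) := by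
  induction t generalizing c k with
  | nil => simp [run2From, run2P, pairsEq]
  | cons d t ih =>
    by_cases hcd : c = d <;> simp [run2From, run2P, pairsEq, hcd, ih]

-- the combinatorial heart: A's interleaved scan equals "monotone, then an exact double",
-- over all 2^10 flag patterns
theorem loopM_eq_spec : ∀ (g1 g2 g3 g4 g5 e1 e2 e3 e4 e5 : Bool),
    (g1 && e1) = false → (g2 && e2) = false → (g3 && e3) = false →
    (g4 && e4) = false → (g5 && e5) = false →
    loopM [(g1, e1), (g2, e2), (g3, e3), (g4, e4), (g5, e5)] false 0
      = (if g1 || g2 || g3 || g4 || g5 then false else run2P 1 [e1, e2, e3, e4, e5]) := by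
  decide

-- A's scan on ANY input: monotone over the five getD-pairs, then an exact double
theorem loopA_spec (cs : List Char) :
    ruleTwoLoop cs 0 false
      = (if decide (cs.getD 1 ' ' < cs.getD 0 ' ') || decide (cs.getD 2 ' ' < cs.getD 1 ' ')
            || decide (cs.getD 3 ' ' < cs.getD 2 ' ') || decide (cs.getD 4 ' ' < cs.getD 3 ' ')
            || decide (cs.getD 5 ' ' < cs.getD 4 ' ') then false
         else run2P 1 [decide (cs.getD 0 ' ' = cs.getD 1 ' '), decide (cs.getD 1 ' ' = cs.getD 2 ' '),
                       decide (cs.getD 2 ' ' = cs.getD 3 ' '), decide (cs.getD 3 ' ' = cs.getD 4 ' '),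
                       decide (cs.getD 4 ' ' = cs.getD 5 ' ')]) := by
  have hcons : ∀ (x y : Char), (decide (y < x) && decide (x = y)) = false := by
    intro x y
    by_cases h : x = y <;> simp [h]
  have hW : pairFlags cs =
      [(decide (cs.getD 1 ' ' < cs.getD 0 ' '), decide (cs.getD 0 ' ' = cs.getD 1 ' ')),
       (decide (cs.getD 2 ' ' < cs.getD 1 ' '), decide (cs.getD 1 ' ' = cs.getD 2 ' ')),
       (decide (cs.getD 3 ' ' < cs.getD 2 ' '), decide (cs.getD 2 ' ' = cs.getD 3 ' ')),
       (decide (cs.getD 4 ' ' < cs.getD 3 ' '), decide (cs.getD 3 ' ' = cs.getD 4 ' ')),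
       (decide (cs.getD 5 ' ' < cs.getD 4 ' '), decide (cs.getD 4 ' ' = cs.getD 5 ' '))] := by
    simp [pairFlags, List.range_succ]
  rw [loop_eq, List.drop_zero, hW,
    loopM_eq_spec _ _ _ _ _ _ _ _ _ _ (hcons _ _) (hcons _ _) (hcons _ _) (hcons _ _) (hcons _ _)]

theorem key_six (a b c d e f : Char) (r : List Char) :
    ruleTwoLoop (a :: b :: c :: d :: e :: f :: r) 0 false
      = ruleTwoAltCore (a :: b :: c :: d :: e :: f :: r) := by
  have hs : PySem.List.slice (a :: b :: c :: d :: e :: f :: r) none (some 6)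
      = [a, b, c, d, e, f] := by
    rw [PySem.List.slice_to]
    · rfl
    · norm_num
  have hfold : (([a, b, c, d, e, f].foldl addRun []).any (fun p => p.2 == 2))
      = run2P 1 [decide (a = b), decide (b = c), decide (c = d), decide (d = e),
                 decide (e = f)] := by
    have h0 : addRun [] a = [(a, 1)] := by simp [addRun]
    have h1 := foldB [b, c, d, e, f] [] a 1
    simp only [List.nil_append] at h1
    rw [List.foldl_cons, h0, h1, run2From_eq_run2P]
    simp [pairsEq]
  have hB : ruleTwoAltCore (a :: b :: c :: d :: e :: f :: r)
      = (if decide (b < a) || decide (c < b) || decide (d < c) || decide (e < d)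
            || decide (f < e) then false
         else run2P 1 [decide (a = b), decide (b = c), decide (c = d), decide (d = e),
                       decide (e = f)]) := by
    simp only [ruleTwoAltCore, hs]
    rw [hfold]
    congr 1
    simp [List.range_succ, List.getD, Bool.or_assoc]
  rw [loopA_spec, hB]
  simp [List.getD]

-- on a short string with an early descent both ports return false
theorem short_false (cs : List Char) (k : Nat) (hk : k < 5)
    (hd : cs.getD (k + 1) ' ' < cs.getD k ' ') :
    ruleTwoLoop cs 0 false = ruleTwoAltCore cs := by
  have hA : ruleTwoLoop cs 0 false = false := by
    rw [loopA_spec]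
    simp only [List.getD] at hd
    interval_cases k <;> simp [hd]
  have hany : ((List.range 5).any
      (fun i => cs.getD i ' ' > cs.getD (i + 1) ' ')) = true := by
    rw [List.any_eq_true]
    refine ⟨k, List.mem_range.mpr (by omega), by simpa [List.getD] using hd⟩
  have hB : ruleTwoAltCore cs = false := by
    simp only [ruleTwoAltCore]
    rw [if_pos hany]
  rw [hA, hB]

-- ===== VERDICT (by name: the statement is the Claim_ definition above) =====
theorem rule_two_spec : Claim_equal_rule_two := by
  intro number _ hpre
  show rule_two number = rule_two_alt number
  rw [rule_two, rule_two_alt]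
  by_cases h6 : 6 ≤ (PySem.Int.toChars number).length
  · obtain ⟨a, b, c, d, e, f, r, hcs⟩ := exists_six _ h6
    rw [hcs]
    exact key_six a b c d e f r
  · rcases hpre with h | ⟨k, hk, hk2, hd⟩
    · omega
    · exact short_false _ k hk hd
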